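-- pv_equiv track=rewrite | github.com/pypi-data/pypi-mirror-338 | packages/DrissionRecorder/DrissionRecorder-3.7.0b0-py3-none-any.whl/DrissionRecorder/tools.py | remove_list_end_Nones
-- ===== SOURCE A (Python) =====
-- def remove_list_end_Nones(in_list):
--     """去除列表后面所有None
--     :param in_list: 要处理的list
--     """
--     h = []
--     flag = True
--     for i in in_list[::-1]:
--         if flag:
--             if i is None:
--                 continue
--             else:
--                 flag = False
--         h.append(i)
--     return h[::-1]
-- ===== SOURCE B (Python) =====
-- def remove_list_end_Nones(in_list):
--     """去除列表后面所有None
--     :param in_list: 要处理的list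
--     """
--     i = len(in_list)
--     while i > 0 and in_list[i - 1] is None:
--         i -= 1
--     return list(in_list[:i])
-- ===== Notes on version B (the rewrite author's own statement) =====
-- stated objective: simpler
-- what changed: Instead of building a reversed intermediate list with a flag and reversing again, B scans a boundary index back from the end and returns a single slice.
import Mathlib
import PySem

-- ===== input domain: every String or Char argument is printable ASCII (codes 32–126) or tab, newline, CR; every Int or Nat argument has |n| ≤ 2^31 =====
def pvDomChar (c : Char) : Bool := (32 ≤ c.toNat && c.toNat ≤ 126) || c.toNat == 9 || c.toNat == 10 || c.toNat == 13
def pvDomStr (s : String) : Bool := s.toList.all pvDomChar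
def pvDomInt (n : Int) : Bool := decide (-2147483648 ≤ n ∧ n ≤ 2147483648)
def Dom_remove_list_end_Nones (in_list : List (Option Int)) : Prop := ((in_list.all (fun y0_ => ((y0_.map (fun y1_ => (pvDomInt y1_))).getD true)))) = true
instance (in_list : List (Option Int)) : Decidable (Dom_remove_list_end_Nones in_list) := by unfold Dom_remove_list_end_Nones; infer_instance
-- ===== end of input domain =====

-- B replaces A's reverse/flag-scan/append/reverse with a boundary index scanned from the end and one slice (objective: simpler).


-- ===== PORT A =====
-- for i in in_list[::-1]: flag-controlled skip of leading Nones, then append; return h[::-1]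
def remove_list_end_Nones (in_list : List (Option Int)) : List (Option Int) :=
  (in_list.reverse.foldl
    (fun (s : List (Option Int) × Bool) i =>
      if s.2 then
        if i = none then s else (s.1 ++ [i], false)
      else (s.1 ++ [i], s.2))
    ([], true)).1.reverse

-- ===== PORT B =====
-- while i > 0 and in_list[i-1] is None: i -= 1   (structural recursion on i; in_list[i-1] is in range since i ≥ 1)
def pvCut_remove (xs : List (Option Int)) : Nat → Nat
  | 0 => 0
  | i + 1 => if xs[i]? = some none then pvCut_remove xs i else i + 1

-- return list(in_list[:i])
def remove_list_end_Nones_alt (in_list : List (Option Int)) : List (Option Int) :=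
  in_list.take (pvCut_remove in_list in_list.length)

-- ===== PRECONDITION & SPEC =====
def Spec_remove_list_end_Nones (in_list : List (Option Int)) (out : List (Option Int)) : Prop := out = remove_list_end_Nones_alt in_list
instance (in_list : List (Option Int)) (out : List (Option Int)) : Decidable (Spec_remove_list_end_Nones in_list out) := by unfold Spec_remove_list_end_Nones; infer_instance

-- ===== CLAIM (what is proved, stated in full; the proofs are below) =====
def Claim_equal_remove_list_end_Nones : Prop := ∀ (in_list : List (Option Int)), Dom_remove_list_end_Nones in_list → Spec_remove_list_end_Nones in_list (remove_list_end_Nones in_list)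

-- ===== LEMMAS AND PROOFS =====
theorem pvCut_le (xs : List (Option Int)) (i : Nat) : pvCut_remove xs i ≤ i := by
  induction i with
  | zero => simp [pvCut_remove]
  | succ n ih => simp only [pvCut_remove]; split <;> omega

theorem pvCut_append (ys : List (Option Int)) (a : Option Int) (i : Nat) (h : i ≤ ys.length) :
    pvCut_remove (ys ++ [a]) i = pvCut_remove ys i := by
  induction i with
  | zero => rfl
  | succ n ih =>
    simp only [pvCut_remove]
    rw [List.getElem?_append_left (by omega), ih (by omega)]

-- once the flag is false, A's loop just appends every remaining element
theorem pvFoldl_false (l h : List (Option Int)) :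
    l.foldl (fun (s : List (Option Int) × Bool) i =>
      if s.2 then (if i = none then s else (s.1 ++ [i], false)) else (s.1 ++ [i], s.2))
      (h, false) = (h ++ l, false) := by
  induction l generalizing h with
  | nil => simp
  | cons x xs ih => simp [ih]

-- ===== VERDICT (by name: the statement is the Claim_ definition above) =====
theorem remove_list_end_Nones_spec : Claim_equal_remove_list_end_Nones := by
  intro in_list hdom
  show remove_list_end_Nones in_list = remove_list_end_Nones_alt in_list
  induction in_list using List.reverseRecOn with
  | nil => rfl
  | append_singleton ys a ih =>
    cases a with
    | none =>
      have hA : remove_list_end_Nones (ys ++ [none]) = remove_list_end_Nones ys := by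
        simp [remove_list_end_Nones]
      have hB : remove_list_end_Nones_alt (ys ++ [none]) = remove_list_end_Nones_alt ys := by
        unfold remove_list_end_Nones_alt
        have hlen : (ys ++ [(none : Option Int)]).length = ys.length + 1 := by simp
        rw [hlen]
        simp only [pvCut_remove]
        rw [List.getElem?_append_right (by omega)]
        simp only [Nat.sub_self, List.getElem?_cons_zero, if_true]
        rw [pvCut_append ys none ys.length le_rfl,
            List.take_append_of_le_length (pvCut_le ys ys.length)]
      have hdy : Dom_remove_list_end_Nones ys := by
        simp only [Dom_remove_list_end_Nones, List.all_append, Bool.and_eq_true] at hdom ⊢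
        exact hdom.1
      rw [hA, hB, ih hdy]
    | some v =>
      have hA : remove_list_end_Nones (ys ++ [some v]) = ys ++ [some v] := by
        unfold remove_list_end_Nones
        rw [List.reverse_append]
        simp only [List.reverse_cons, List.reverse_nil, List.nil_append,
          List.singleton_append, List.foldl_cons]
        rw [if_pos trivial, if_neg (by simp), pvFoldl_false]
        simp
      have hB : remove_list_end_Nones_alt (ys ++ [some v]) = ys ++ [some v] := by
        unfold remove_list_end_Nones_alt
        have hlen : (ys ++ [some v]).length = ys.length + 1 := by simp
        rw [hlen]
        simp only [pvCut_remove]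
        rw [List.getElem?_append_right (by omega)]
        simp only [Nat.sub_self, List.getElem?_cons_zero]
        rw [if_neg (by simp)]
        exact List.take_of_length_le (by simp)
      rw [hA, hB]
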